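-- pv_equiv track=rewrite | github.com/rustsjunk/ERPpos | pos_service.py | _infer_variant_attributes_from_name
-- ===== SOURCE A (Python) =====
-- from typing import List, Dict, Any, Optional, Set, Tuple
--
-- def _infer_variant_attributes_from_name(item_id: str) -> Optional[List[Dict[str, Any]]]:
--     """Best-effort parse variant naming convention Brand-Style-...-Color-Size to recover attributes."""
--     if not item_id:
--         return None
--     parts = [p.strip() for p in item_id.split("-") if p and p.strip()]
--     if len(parts) < 2:
--         return None
--
--     def _numeric_token(token: str) -> bool:
--         text = token.strip()
--         return text.isdigit()
--
--     parts_work: List[str] = parts[:]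
--     rows: List[Dict[str, Any]] = []
--     size = None
--     if parts_work:
--         size_chunks = [parts_work.pop()]
--         # Join trailing numeric segments so "36-40" stays intact instead of splitting color/size.
--         while parts_work and _numeric_token(size_chunks[-1]) and _numeric_token(parts_work[-1]):
--             size_chunks.append(parts_work.pop())
--         size = "-".join(reversed(size_chunks)).strip()
--     color = parts_work.pop() if parts_work else None
--     if color:
--         rows.append({"attribute": "Colour", "attribute_value": color})
--         rows.append({"attribute": "Color", "attribute_value": color})
--     if size:
--         rows.append({"attribute": "EU half Sizes", "attribute_value": size})
--         rows.append({"attribute": "Size", "attribute_value": size})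
--     return rows or None
-- ===== SOURCE B (Python) =====
-- def _infer_variant_attributes_from_name(item_id):
--     """Boundary-index formulation: count trailing numeric tokens, then slice, instead of the pop/merge loop."""
--     if not item_id:
--         return None
--     parts = [p.strip() for p in item_id.split("-") if p and p.strip()]
--     n = len(parts)
--     if n < 2:
--         return None
--     k = 0
--     for tok in reversed(parts):
--         if tok.strip().isdigit():
--             k += 1
--         else:
--             break
--     m = k if k else 1
--     size = "-".join(parts[n - m:]).strip()
--     color = parts[n - m - 1] if n > m else None
--     rows = []
--     if color:
--         rows.append({"attribute": "Colour", "attribute_value": color})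
--         rows.append({"attribute": "Color", "attribute_value": color})
--     if size:
--         rows.append({"attribute": "EU half Sizes", "attribute_value": size})
--         rows.append({"attribute": "Size", "attribute_value": size})
--     return rows or None
-- ===== Notes on version B (the rewrite author's own statement) =====
-- stated objective: simpler
-- what changed: Replaces A's incremental pop/merge while-loop over a mutable work list with a single count of trailing numeric tokens followed by direct slice/index arithmetic on the parts list.
import Mathlib
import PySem

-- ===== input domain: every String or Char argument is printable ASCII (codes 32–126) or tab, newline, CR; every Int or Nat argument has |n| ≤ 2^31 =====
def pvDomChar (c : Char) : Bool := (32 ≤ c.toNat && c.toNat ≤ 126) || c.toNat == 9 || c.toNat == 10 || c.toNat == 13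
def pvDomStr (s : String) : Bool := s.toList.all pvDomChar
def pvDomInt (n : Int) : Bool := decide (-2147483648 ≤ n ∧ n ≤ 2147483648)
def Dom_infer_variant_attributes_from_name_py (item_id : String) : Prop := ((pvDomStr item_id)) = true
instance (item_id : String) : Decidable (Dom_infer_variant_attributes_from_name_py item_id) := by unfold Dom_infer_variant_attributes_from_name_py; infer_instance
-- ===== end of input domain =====

-- B replaces A's incremental pop/merge loop by one trailing-numeric count followed by slice/index
-- arithmetic (objective: simpler decomposition, same cost). Equivalence is proved for every input.

-- ===== PORT A =====
-- token.strip().isdigit()  (A's _numeric_token; B's python repeats the same expression inline)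
def pvNumeric (t : String) : Bool := PySem.Str.strIsdigit (PySem.Str.strip t)

-- [p.strip() for p in item_id.split("-") if p and p.strip()]  (identical line in A and in B)
-- split? is always `some` here because the separator "-" is nonempty.
def pvParts (item_id : String) : List String :=
  (((PySem.Str.split? item_id "-").getD []).filter
      (fun p => p ≠ "" && PySem.Str.strip p ≠ "")).map PySem.Str.strip

-- while parts_work and _numeric_token(size_chunks[-1]) and _numeric_token(parts_work[-1]):
--     size_chunks.append(parts_work.pop())
def pvSizeLoop (work chunks : List String) : List String × List String :=
  if h : work ≠ [] ∧ pvNumeric (chunks.getLastD "") = true ∧ pvNumeric (work.getLastD "") = true then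
    pvSizeLoop work.dropLast (chunks ++ [work.getLastD ""])
  else (work, chunks)
termination_by work.length
decreasing_by
  rw [List.length_dropLast]
  exact Nat.sub_lt (List.length_pos_of_ne_nil h.1) one_pos

def infer_variant_attributes_from_name_py (item_id : String) : Option (List (List (String × String))) :=
  if item_id = "" then none
  else
    let parts := pvParts item_id
    if parts.length < 2 then none
    else
      -- size = None; if parts_work: size_chunks = [parts_work.pop()]; while …; size = "-".join(reversed(size_chunks)).strip()
      let ws : List String × Option String :=
        if parts.isEmpty then (parts, none)
        else
          let res := pvSizeLoop parts.dropLast [parts.getLastD ""]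
          (res.1, some (PySem.Str.strip (PySem.Str.join "-" res.2.reverse)))
      -- color = parts_work.pop() if parts_work else None
      let color : Option String := if ws.1.isEmpty then none else some (ws.1.getLastD "")
      let rows : List (List (String × String)) :=
        (match color with
         | some c => if c ≠ "" then
             [[("attribute", "Colour"), ("attribute_value", c)],
              [("attribute", "Color"), ("attribute_value", c)]] else []
         | none => []) ++
        (match ws.2 with
         | some s => if s ≠ "" then
             [[("attribute", "EU half Sizes"), ("attribute_value", s)],
              [("attribute", "Size"), ("attribute_value", s)]] else []
         | none => [])
      if rows.isEmpty then none else some rows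

-- ===== PORT B =====
-- for tok in reversed(parts): if tok.strip().isdigit(): k += 1 else: break
def pvCountTrailing : List String → Nat
  | [] => 0
  | t :: rest => if pvNumeric t then pvCountTrailing rest + 1 else 0

def infer_variant_attributes_from_name_py_alt (item_id : String) : Option (List (List (String × String))) :=
  if item_id = "" then none
  else
    let parts := pvParts item_id
    let n := parts.length
    if n < 2 then none
    else
      let k := pvCountTrailing parts.reverse
      let m := if k = 0 then 1 else k
      -- size = "-".join(parts[n - m:]).strip()   (0 ≤ n - m here, so the slice is a plain drop)
      let size := PySem.Str.strip (PySem.Str.join "-" (parts.drop (n - m)))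
      -- color = parts[n - m - 1] if n > m else None
      let color : Option String := if m < n then PySem.List.pyGet? parts ((n : Int) - (m : Int) - 1) else none
      let rows : List (List (String × String)) :=
        (match color with
         | some c => if c ≠ "" then
             [[("attribute", "Colour"), ("attribute_value", c)],
              [("attribute", "Color"), ("attribute_value", c)]] else []
         | none => []) ++
        (if size ≠ "" then
             [[("attribute", "EU half Sizes"), ("attribute_value", size)],
              [("attribute", "Size"), ("attribute_value", size)]] else [])
      if rows.isEmpty then none else some rows

-- ===== PRECONDITION & SPEC =====
def Spec_infer_variant_attributes_from_name_py (item_id : String) (out : Option (List (List (String × String)))) : Prop := out = infer_variant_attributes_from_name_py_alt item_id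
instance (item_id : String) (out : Option (List (List (String × String)))) : Decidable (Spec_infer_variant_attributes_from_name_py item_id out) := by unfold Spec_infer_variant_attributes_from_name_py; infer_instance

-- ===== CLAIM (what is proved, stated in full; the proofs are below) =====
def Claim_equal_infer_variant_attributes_from_name_py : Prop := ∀ (item_id : String), Dom_infer_variant_attributes_from_name_py item_id → Spec_infer_variant_attributes_from_name_py item_id (infer_variant_attributes_from_name_py item_id)

-- ===== LEMMAS AND PROOFS =====

-- the common normal form both cores are rewritten to (proof-side helper only)
def pvCanon (ys : List String) (y : String) : Option (List (List (String × String))) :=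
  let size : String :=
    if pvNumeric y then
      PySem.Str.strip (PySem.Str.join "-" ((ys.reverse.takeWhile pvNumeric).reverse ++ [y]))
    else PySem.Str.strip (PySem.Str.join "-" [y])
  let color : Option String :=
    if pvNumeric y then (ys.reverse.dropWhile pvNumeric).head? else ys.getLast?
  let rows : List (List (String × String)) :=
    (match color with
     | some c => if c ≠ "" then
         [[("attribute", "Colour"), ("attribute_value", c)],
          [("attribute", "Color"), ("attribute_value", c)]] else []
     | none => []) ++
    (if size ≠ "" then
         [[("attribute", "EU half Sizes"), ("attribute_value", size)],
          [("attribute", "Size"), ("attribute_value", size)]] else [])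
  if rows.isEmpty then none else some rows

theorem pv_takeWhile_eq_take {α : Type} (p : α → Bool) (l : List α) :
    l.takeWhile p = l.take (l.takeWhile p).length := by
  induction l with
  | nil => rfl
  | cons a l ih =>
    by_cases h : p a
    · simp only [List.takeWhile_cons, if_pos h, List.length_cons, List.take_succ_cons]
      exact congrArg (a :: ·) ih
    · simp [h]

theorem pv_dropWhile_eq_drop {α : Type} (p : α → Bool) (l : List α) :
    l.dropWhile p = l.drop (l.takeWhile p).length := by
  induction l with
  | nil => rfl
  | cons a l ih =>
    by_cases h : p a
    · simp [h, ih]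
    · simp [h]

theorem pv_count_eq (l : List String) :
    pvCountTrailing l = (l.takeWhile pvNumeric).length := by
  induction l with
  | nil => rfl
  | cons a l ih =>
    by_cases h : pvNumeric a
    · simp [pvCountTrailing, h, ih]
    · simp [pvCountTrailing, h]

theorem pvSizeLoop_spec (w : List String) : ∀ (chunks : List String), chunks ≠ [] →
    pvSizeLoop w chunks =
      if pvNumeric (chunks.getLastD "") then
        ((w.reverse.dropWhile pvNumeric).reverse, chunks ++ w.reverse.takeWhile pvNumeric)
      else (w, chunks) := by
  induction w using List.reverseRecOn with
  | nil =>
    intro chunks hc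
    rw [pvSizeLoop]
    simp
  | append_singleton ys y ih =>
    intro chunks hc
    rw [pvSizeLoop]
    by_cases hck : pvNumeric (chunks.getLastD "") = true
    · by_cases hy : pvNumeric y = true
      · rw [dif_pos ⟨by simp, hck, by simpa [List.getLastD_concat] using hy⟩]
        rw [List.dropLast_concat, List.getLastD_concat]
        rw [ih (chunks ++ [y]) (by simp)]
        rw [List.getLastD_concat, if_pos hy, if_pos hck]
        simp [hy]
      · rw [dif_neg (by simp [hy])]
        rw [if_pos hck]
        simp [hy]
    · rw [dif_neg (fun hcon => hck hcon.2.1)]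
      rw [if_neg hck]

theorem pv_color_getLast (l : List String) :
    (if l.isEmpty then none else some (l.getLastD "")) = l.getLast? := by
  cases l with
  | nil => rfl
  | cons a l =>
    cases hl : (a :: l).getLast? with
    | none => exact absurd (List.getLast?_eq_none_iff.mp hl) (by simp)
    | some x => simp [List.getLastD_eq_getLast?, hl]

theorem pvA_char (item_id : String) (ys : List String) (y : String)
    (h0 : item_id ≠ "") (hp : pvParts item_id = ys ++ [y]) (hys : ys ≠ []) :
    infer_variant_attributes_from_name_py item_id = pvCanon ys y := by
  have hlen : ¬ (ys ++ [y]).length < 2 := by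
    have := List.length_pos_of_ne_nil hys
    simp only [List.length_append, List.length_cons, List.length_nil]
    omega
  rw [infer_variant_attributes_from_name_py, if_neg h0, hp, if_neg hlen]
  have hie : (ys ++ [y]).isEmpty = false := by simp
  rw [hie]
  simp only [Bool.false_eq_true, if_false, List.dropLast_concat, List.getLastD_concat]
  rw [pvSizeLoop_spec ys [y] (by simp)]
  simp only [List.getLastD_cons, List.getLastD_nil]
  by_cases hy : pvNumeric y = true
  · rw [if_pos hy, pvCanon]
    simp only [hy, if_pos]
    rw [pv_color_getLast ((ys.reverse.dropWhile pvNumeric).reverse)]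
    rw [List.getLast?_reverse]
    simp
  · rw [if_neg hy, pvCanon]
    simp only [hy, Bool.false_eq_true, if_false]
    rw [pv_color_getLast ys]
    simp

set_option maxHeartbeats 1000000 in
theorem pvB_char (item_id : String) (ys : List String) (y : String)
    (h0 : item_id ≠ "") (hp : pvParts item_id = ys ++ [y]) (hys : ys ≠ []) :
    infer_variant_attributes_from_name_py_alt item_id = pvCanon ys y := by
  have hpos : 0 < ys.length := List.length_pos_of_ne_nil hys
  have hlen : ¬ (ys ++ [y]).length < 2 := by
    simp only [List.length_append, List.length_cons, List.length_nil]
    omega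
  rw [infer_variant_attributes_from_name_py_alt, if_neg h0, hp, if_neg hlen]
  have hrev : (ys ++ [y]).reverse = y :: ys.reverse := List.reverse_concat
  rw [hrev]
  set j := (ys.reverse.takeWhile pvNumeric).length with hj
  have hjle : j ≤ ys.length := by
    have := (List.takeWhile_sublist (l := ys.reverse) (p := pvNumeric)).length_le
    simpa [hj] using this
  by_cases hy : pvNumeric y = true
  · have hk : pvCountTrailing (y :: ys.reverse) = j + 1 := by
      simp [pvCountTrailing, hy, pv_count_eq, hj]
    simp only [hk]
    have hm : (if j + 1 = 0 then 1 else j + 1) = j + 1 := by simp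
    rw [hm, pvCanon]
    simp only [hy, if_pos]
    -- size
    have hdrop : (ys ++ [y]).drop ((ys ++ [y]).length - (j + 1)) =
        (ys.reverse.takeWhile pvNumeric).reverse ++ [y] := by
      have h1 : (ys ++ [y]).length - (j + 1) = ys.length - j := by
        simp only [List.length_append, List.length_cons, List.length_nil]
        omega
      rw [h1]
      have h2 : (ys ++ [y]).drop (ys.length - j) = ys.drop (ys.length - j) ++ [y] := by
        rw [List.drop_append_of_le_length (by omega)]
      rw [h2]
      have h3 : ys.reverse.takeWhile pvNumeric = ys.reverse.take j := by
        rw [hj]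
        exact pv_takeWhile_eq_take pvNumeric ys.reverse
      rw [h3, List.take_reverse, List.reverse_reverse]
    rw [hdrop]
    -- color
    have hmlt : ((j + 1 < (ys ++ [y]).length) ↔ (j < ys.length)) := by
      simp only [List.length_append, List.length_cons, List.length_nil]
      omega
    by_cases hlt : j < ys.length
    · have hlt' : j + 1 < (ys ++ [y]).length := hmlt.mpr hlt
      simp only [if_pos hlt']
      have hidx : (((ys ++ [y]).length : Int) - ((j + 1 : Nat) : Int) - 1) =
          ((ys.length - j - 1 : Nat) : Int) := by
        simp only [List.length_append, List.length_cons, List.length_nil]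
        omega
      rw [hidx, PySem.List.pyGet?_natCast]
      have hidx2 : (ys ++ [y])[(ys.length - j - 1 : Nat)]? = ys[(ys.length - j - 1 : Nat)]? :=
        List.getElem?_append_left (by omega)
      rw [hidx2]
      have hcolor : (ys.reverse.dropWhile pvNumeric).head? = ys[(ys.length - j - 1 : Nat)]? := by
        rw [pv_dropWhile_eq_drop, ← hj, List.head?_drop, List.getElem?_reverse (by omega)]
        congr 1
        omega
      rw [hcolor]
    · have hlt' : ¬ (j + 1 < (ys ++ [y]).length) := fun h => hlt (hmlt.mp h)
      simp only [if_neg hlt']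
      have hj' : ys.reverse.length ≤ j := by simp; omega
      have hdw : ys.reverse.dropWhile pvNumeric = [] := by
        rw [pv_dropWhile_eq_drop, ← hj]
        exact List.drop_eq_nil_of_le hj'
      simp [hdw]
  · have hk : pvCountTrailing (y :: ys.reverse) = 0 := by
      simp [pvCountTrailing, hy]
    have hm0 : (if pvCountTrailing (y :: ys.reverse) = 0 then 1
        else pvCountTrailing (y :: ys.reverse)) = 1 := by rw [hk]; decide
    simp only [hm0, pvCanon]
    simp only [hy, Bool.false_eq_true, if_false]
    -- size
    have hdrop : (ys ++ [y]).drop ((ys ++ [y]).length - 1) = [y] := by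
      have h1 : (ys ++ [y]).length - 1 = ys.length := by
        simp only [List.length_append, List.length_cons, List.length_nil]
        omega
      rw [h1, List.drop_left]
    rw [hdrop]
    -- color
    have hlt' : 1 < (ys ++ [y]).length := by
      simp only [List.length_append, List.length_cons, List.length_nil]; omega
    simp only [if_pos hlt']
    have hidx : (((ys ++ [y]).length : Int) - ((1 : Nat) : Int) - 1) =
        ((ys.length - 1 : Nat) : Int) := by
      simp only [List.length_append, List.length_cons, List.length_nil]
      omega
    rw [hidx, PySem.List.pyGet?_natCast]
    have hidx2 : (ys ++ [y])[(ys.length - 1 : Nat)]? = ys[(ys.length - 1 : Nat)]? :=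
      List.getElem?_append_left (by omega)
    rw [hidx2, ← List.getLast?_eq_getElem?]

-- ===== VERDICT (by name: the statement is the Claim_ definition above) =====
theorem infer_variant_attributes_from_name_py_spec : Claim_equal_infer_variant_attributes_from_name_py := by
  intro item_id _
  unfold Spec_infer_variant_attributes_from_name_py
  by_cases h0 : item_id = ""
  · rw [infer_variant_attributes_from_name_py, infer_variant_attributes_from_name_py_alt,
      if_pos h0, if_pos h0]
  · by_cases h2 : (pvParts item_id).length < 2
    · rw [infer_variant_attributes_from_name_py, infer_variant_attributes_from_name_py_alt,
        if_neg h0, if_neg h0, if_pos h2, if_pos h2]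
    · rcases List.eq_nil_or_concat (pvParts item_id) with hnil | ⟨ys, y, hp0⟩
      · rw [hnil] at h2; simp at h2
      · have hp : pvParts item_id = ys ++ [y] := by simpa [List.concat_eq_append] using hp0
        have hys : ys ≠ [] := by
          intro h
          rw [hp, h] at h2
          simp at h2
        rw [pvA_char item_id ys y h0 hp hys, pvB_char item_id ys y h0 hp hys]
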